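-- pv_equiv track=rewrite | github.com/tryatim8/andersenlab_aqa_trainee | three_days_tasks/second_task.py | fix_bracket_seq
-- ===== SOURCE A (Python) =====
-- def count_wrong_brackets(bracket_seq: str) -> dict[str, list[tuple[int, str]]]:
--     """
--     Function returns dictionary of unclosed brackets
--     and incorrectly closing brackets.
--     """
--     # Example of return: {'left_brackets': [(1, '(')], 'right_brackets': [(12, ']')]}
--     # Init dicts and variables
--     unclosed_left_br = []
--     unclosed_right_br = []
--     wrong_left_br = []
--     wrong_right_br = []
--     previous_sym = None
--     # Searching wrong brackets
--     for i_enum, i_sym in enumerate(bracket_seq):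
--         # If opening bracket, continue cycle
--         if i_sym in '([':
--             unclosed_left_br.append((i_enum, i_sym))
--         # If bracket does not close previous, remove or swap
--         elif i_sym == ')':
--             if previous_sym == '(':
--                 unclosed_left_br.pop()
--             elif unclosed_left_br:
--                 wrong_left_br.append(unclosed_left_br.pop())
--                 wrong_right_br.append((i_enum, i_sym))
--             else:
--                 unclosed_right_br.append((i_enum, i_sym))
--         # Same as the previous one
--         elif i_sym == ']':
--             if previous_sym == '[':
--                 unclosed_left_br.pop()
--             elif unclosed_left_br:
--                 wrong_left_br.append(unclosed_left_br.pop())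
--                 wrong_right_br.append((i_enum, i_sym))
--             else:
--                 unclosed_right_br.append((i_enum, i_sym))
--         try:
--             previous_sym = unclosed_left_br[-1][1]
--         except IndexError:
--             previous_sym = None
--     unclosed_brackets = unclosed_left_br + unclosed_right_br
--
--     return {
--         'lefts_swap': wrong_left_br,
--         'rights_swap': wrong_right_br,
--         'brackets_remove': unclosed_brackets,
--     }
--
-- def fix_bracket_seq(string: str) -> str:
--     """Function makes bracket sequence correct."""
--     wrongs = count_wrong_brackets(string)
--     symbols: dict = {i_num: i_sym for i_num, i_sym in enumerate(string)}
--
--     if lefts_swap := wrongs.get('lefts_swap'):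
--         for i_num, i_sym in lefts_swap:
--             symbols[i_num] = '(' if i_sym != '(' else '['
--     if brackets_remove := wrongs.get('brackets_remove'):
--         for i_num, _ in brackets_remove:
--             symbols.pop(i_num)
--
--     return ''.join(symbols.values())
-- ===== SOURCE B (Python) =====
-- def fix_bracket_seq(string: str) -> str:
--     """Function makes bracket sequence correct (simpler single pass).
--
--     One stack of open-bracket indices; a close bracket with a non-empty stack
--     always pops and rewrites the popped position to its matching opener (a
--     no-op when the pair already matched), any other unmatched bracket is
--     dropped.
--     """
--     out = list(string)
--     stack = []
--     drop = set()
--     for i, c in enumerate(string):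
--         if c in '([':
--             stack.append(i)
--         elif c in ')]':
--             if stack:
--                 out[stack.pop()] = '(' if c == ')' else '['
--             else:
--                 drop.add(i)
--     drop.update(stack)
--     return ''.join(c for i, c in enumerate(out) if i not in drop)
-- ===== Notes on version B (the rewrite author's own statement) =====
-- stated objective: simpler
-- what changed: B replaces A's two-phase design (a helper that tracks a previous-symbol variable and collects swap/remove lists, then a dict rebuild that applies the swaps and pops the removals) with one left-to-right pass keeping only a stack of open-bracket indices and a drop set: a close bracket with a non-empty stack unconditionally rewrites the popped position to the opener matching the close (a no-op when the pair already matched), so no match/mismatch branching, no previous-symbol tracking, no swap lists and no dict are needed. …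
import Mathlib
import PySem

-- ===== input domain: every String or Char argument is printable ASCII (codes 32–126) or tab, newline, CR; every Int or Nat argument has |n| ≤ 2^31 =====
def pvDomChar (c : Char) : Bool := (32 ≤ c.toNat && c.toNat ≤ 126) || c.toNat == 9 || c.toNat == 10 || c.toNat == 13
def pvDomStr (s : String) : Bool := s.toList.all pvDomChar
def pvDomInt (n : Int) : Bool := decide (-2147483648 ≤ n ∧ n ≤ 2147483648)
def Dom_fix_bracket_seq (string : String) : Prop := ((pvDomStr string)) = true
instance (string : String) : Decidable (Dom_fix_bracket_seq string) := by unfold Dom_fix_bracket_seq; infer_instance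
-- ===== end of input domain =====

-- B merges A's helper + dict-rebuild into one stack-and-drop-set pass (simpler decomposition, same values).


-- ===== PORT A =====
-- "symbols[i_num] = '(' if i_sym != '(' else '['"
def pvFlip (c : Char) : Char := if c ≠ '(' then '(' else '['

-- State of count_wrong_brackets' loop:
-- (unclosed_left_br, unclosed_right_br, wrong_left_br, wrong_right_br, previous_sym).
-- Python appends/pops at the RIGHT end of each of the four lists; they are represented
-- head-first here (append = cons, pop = head/tail, [-1] = head?) and reversed back to
-- Python order when count_wrong_brackets returns.
def cwStep (st : List (Int × Char) × List (Int × Char) × List (Int × Char) × List (Int × Char) × Option Char)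
    (ic : Int × Char) :
    List (Int × Char) × List (Int × Char) × List (Int × Char) × List (Int × Char) × Option Char :=
  let (ul, ur, wl, wr, prev) := st
  let (i, c) := ic
  let (ul, ur, wl, wr) :=
    if c = '(' ∨ c = '[' then ((i, c) :: ul, ur, wl, wr)
    else if c = ')' then
      (if prev = some '(' then (ul.tail, ur, wl, wr)
       else match ul with
         | t :: rest => (rest, ur, t :: wl, (i, c) :: wr)
         | [] => ([], (i, c) :: ur, wl, wr))
    else if c = ']' then
      (if prev = some '[' then (ul.tail, ur, wl, wr)
       else match ul with
         | t :: rest => (rest, ur, t :: wl, (i, c) :: wr)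
         | [] => ([], (i, c) :: ur, wl, wr))
    else (ul, ur, wl, wr)
  -- try: previous_sym = unclosed_left_br[-1][1]  except IndexError: previous_sym = None
  (ul, ur, wl, wr, ul.head?.map Prod.snd)

-- returns (lefts_swap, rights_swap, brackets_remove)
def count_wrong_brackets (bracket_seq : List Char) :
    List (Int × Char) × List (Int × Char) × List (Int × Char) :=
  let st := (PySem.List.enumerate bracket_seq).foldl cwStep ([], [], [], [], none)
  (st.2.2.1.reverse, st.2.2.2.1.reverse, st.1.reverse ++ st.2.1.reverse)

def fix_bracket_seq (string : String) : String :=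
  let cs := string.toList
  let wrongs := count_wrong_brackets cs
  -- symbols = {i_num: i_sym for i_num, i_sym in enumerate(string)}
  let symbols : PySem.Dict Int Char :=
    (PySem.List.enumerate cs).foldl (fun d p => d.insert p.1 p.2) (PySem.Dict.mk [])
  -- "if lefts_swap := …:" / "if brackets_remove := …:" only skip an EMPTY loop; the fold over [] is the identity
  let symbols := wrongs.1.foldl (fun d p => d.insert p.1 (pvFlip p.2)) symbols
  let symbols := wrongs.2.2.foldl (fun d p => d.erase p.1) symbols
  String.mk symbols.values

-- ===== PORT B =====
-- One pass: (out, stack of open-bracket indices, drop set); Python's right-end stack is head-first here.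
def fbStep (st : List Char × List Int × PySem.Set Int) (ic : Int × Char) :
    List Char × List Int × PySem.Set Int :=
  let (out, stack, drop) := st
  let (i, c) := ic
  if c = '(' ∨ c = '[' then (out, i :: stack, drop)
  else if c = ')' ∨ c = ']' then
    match stack with
    | j :: rest => (PySem.List.pySetD out j (if c = ')' then '(' else '['), rest, drop)
    | [] => (out, [], drop.add i)
  else st

def fix_bracket_seq_alt (string : String) : String :=
  let cs := string.toList
  let st := (PySem.List.enumerate cs).foldl fbStep (cs, [], PySem.Set.empty)
  -- drop.update(stack): result is consumed only through membership, so fold order is immaterial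
  let drop := st.2.1.foldl PySem.Set.add st.2.2
  String.mk ((PySem.List.enumerate st.1).filterMap fun p => if drop.contains p.1 then none else some p.2)

-- ===== PRECONDITION & SPEC =====
def Spec_fix_bracket_seq (string : String) (out : String) : Prop := out = fix_bracket_seq_alt string
instance (string : String) (out : String) : Decidable (Spec_fix_bracket_seq string out) := by unfold Spec_fix_bracket_seq; infer_instance

-- ===== CLAIM (what is proved, stated in full; the proofs are below) =====
def Claim_equal_fix_bracket_seq : Prop := ∀ (string : String), Dom_fix_bracket_seq string → Spec_fix_bracket_seq string (fix_bracket_seq string)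

-- ===== LEMMAS AND PROOFS =====

-- out as A's wrong_left_br patch list applied to the original characters
def pvPatch (cs : List Char) (wl : List (Int × Char)) : List Char :=
  wl.foldr (fun p o => o.set p.1.toNat (pvFlip p.2)) cs

theorem pvPatch_length (cs : List Char) (wl : List (Int × Char)) :
    (pvPatch cs wl).length = cs.length := by
  induction wl with
  | nil => rfl
  | cons p wl ih => simpa [pvPatch] using ih

-- the simulation invariant between A's and B's loop states
def pvRel (cs0 : List Char)
    (a : List (Int × Char) × List (Int × Char) × List (Int × Char) × List (Int × Char) × Option Char)
    (b : List Char × List Int × PySem.Set Int) : Prop :=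
  b.2.1 = a.1.map Prod.fst ∧
  (∀ j : Int, b.2.2.contains j = true ↔ j ∈ a.2.1.map Prod.fst) ∧
  b.1 = pvPatch cs0 a.2.2.1 ∧
  (∀ p ∈ a.2.2.1, ∃ m : Nat, p.1 = (m : Int) ∧ m < cs0.length)

theorem set_same (xs : List Char) (m : Nat) (v : Char) (h : xs[m]? = some v) :
    xs.set m v = xs := by
  have hlt : m < xs.length := (List.getElem?_eq_some_iff.mp h).1
  apply List.ext_getElem?
  intro j
  rw [List.getElem?_set]
  split_ifs <;> simp_all

theorem set_contains_iff (s : PySem.Set Int) (j : Int) : s.contains j = true ↔ j ∈ s := by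
  simp [PySem.Set.contains]

theorem contains_add (s : PySem.Set Int) (x j : Int) :
    (s.add x).contains j = true ↔ s.contains j = true ∨ j = x := by
  rw [set_contains_iff, set_contains_iff, PySem.Set.mem_add]

theorem sim (cs0 : List Char) (rest : List Char) : ∀ (k : Nat)
    (ul ur wl wr : List (Int × Char)) (out : List Char) (drop : PySem.Set Int),
    (∀ p ∈ ul, (p.2 = '(' ∨ p.2 = '[') ∧ ∃ m : Nat, p.1 = (m : Int) ∧ m < k ∧ out[m]? = some p.2) →
    List.Pairwise (fun p q => q.1 < p.1) ul →
    (∀ j : Int, drop.contains j = true ↔ j ∈ ur.map Prod.fst) →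
    (∀ m : Nat, (hm : m < rest.length) → out[k + m]? = some rest[m]) →
    out = pvPatch cs0 wl →
    (∀ p ∈ wl, ∃ m : Nat, p.1 = (m : Int) ∧ m < cs0.length) →
    pvRel cs0 ((PySem.List.enumerate rest k).foldl cwStep (ul, ur, wl, wr, ul.head?.map Prod.snd))
              ((PySem.List.enumerate rest k).foldl fbStep (out, ul.map Prod.fst, drop)) := by
  induction rest with
  | nil =>
    intro k ul ur wl wr out drop h3 hdec h4 h5 h6 h7
    rw [PySem.List.enumerate_nil]
    exact ⟨rfl, h4, h6, h7⟩
  | cons c rest ih =>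
    intro k ul ur wl wr out drop h3 hdec h4 h5 h6 h7
    rw [PySem.List.enumerate_cons, List.foldl_cons, List.foldl_cons]
    have hcast : ((k : Int) + 1) = (((k + 1 : Nat)) : Int) := by push_cast; ring
    rw [hcast]
    have hout_len : out.length = cs0.length := by rw [h6]; exact pvPatch_length cs0 wl
    have hc0 : out[k]? = some c := by simpa using h5 0 (by simp)
    have h5s : ∀ m' : Nat, (hm : m' < rest.length) → out[(k + 1) + m']? = some rest[m'] := by
      intro m' hm
      have := h5 (m' + 1) (by simpa using Nat.succ_lt_succ hm)
      simpa [show k + (m' + 1) = (k + 1) + m' by omega] using this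
    by_cases hopen : c = '(' ∨ c = '['
    · -- opening bracket: push
      have hA : cwStep (ul, ur, wl, wr, ul.head?.map Prod.snd) ((k : Int), c)
          = (((k : Int), c) :: ul, ur, wl, wr, ((((k : Int), c) :: ul).head?.map Prod.snd)) := by
        simp [cwStep, hopen]
      have hB : fbStep (out, ul.map Prod.fst, drop) ((k : Int), c)
          = (out, ((((k : Int), c) :: ul).map Prod.fst), drop) := by
        simp [fbStep, hopen]
      rw [hA, hB]
      apply ih (k + 1) (((k : Int), c) :: ul) ur wl wr out drop ?_ ?_ h4 h5s h6 h7
      · intro p hp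
        rcases List.mem_cons.mp hp with rfl | hp'
        · exact ⟨hopen, k, rfl, by omega, hc0⟩
        · obtain ⟨ho, m, h1, h2, h3'⟩ := h3 p hp'
          exact ⟨ho, m, h1, by omega, h3'⟩
      · refine List.pairwise_cons.mpr ⟨?_, hdec⟩
        intro q hq
        obtain ⟨_, m, h1, h2, _⟩ := h3 q hq
        show q.1 < (k : Int)
        rw [h1]; exact_mod_cast h2
    · by_cases hcp : c = ')'
      · subst hcp
        by_cases hprev : ul.head?.map Prod.snd = some '('
        · -- matched pair: pop, B's write is a no-op
          cases ul with
          | nil => simp at hprev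
          | cons t ulr =>
            have ht2 : t.2 = '(' := by simpa using hprev
            obtain ⟨hop, m, hm1, hmk, houtm⟩ := h3 t (List.mem_cons_self)
            have hA : cwStep ((t :: ulr), ur, wl, wr, ((t :: ulr).head?.map Prod.snd)) ((k : Int), ')')
                = (ulr, ur, wl, wr, (ulr.head?.map Prod.snd)) := by
              simp [cwStep, ht2]
            have hB : fbStep (out, ((t :: ulr).map Prod.fst), drop) ((k : Int), ')')
                = (out, ulr.map Prod.fst, drop) := by
              have hstep : fbStep (out, ((t :: ulr).map Prod.fst), drop) ((k : Int), ')')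
                  = (PySem.List.pySetD out t.1 '(', ulr.map Prod.fst, drop) := by
                simp [fbStep]
              rw [hstep, hm1, PySem.List.pySetD_natCast, set_same out m '(' (ht2 ▸ houtm)]
            rw [hA, hB]
            apply ih (k + 1) ulr ur wl wr out drop ?_ (List.pairwise_cons.mp hdec).2 h4 h5s h6 h7
            intro p hp
            obtain ⟨ho, m', h1, h2, h3'⟩ := h3 p (List.mem_cons_of_mem t hp)
            exact ⟨ho, m', h1, by omega, h3'⟩
        · cases ul with
          | nil =>
            -- unmatched close: A records it in unclosed_right_br, B in the drop set
            have hA : cwStep (([] : List (Int × Char)), ur, wl, wr, (([] : List (Int × Char)).head?.map Prod.snd)) ((k : Int), ')')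
                = ([], ((k : Int), ')') :: ur, wl, wr, none) := by
              simp [cwStep]
            have hB : fbStep (out, (([] : List (Int × Char)).map Prod.fst), drop) ((k : Int), ')')
                = (out, ([] : List Int), drop.add (k : Int)) := by
              simp [fbStep]
            rw [hA, hB]
            apply ih (k + 1) [] (((k : Int), ')') :: ur) wl wr out (drop.add (k : Int))
              (by intro p hp; cases hp) List.Pairwise.nil ?_ h5s h6 h7
            intro j
            rw [contains_add, h4]
            simp only [List.map_cons, List.mem_cons]
            tauto
          | cons t ulr =>
            -- mismatched pair: A schedules a swap, B rewrites the popped position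
            have ht2 : t.2 ≠ '(' := by
              intro hcontra
              exact hprev (by simp [hcontra])
            obtain ⟨hop, m, hm1, hmk, houtm⟩ := h3 t (List.mem_cons_self)
            have hflip : pvFlip t.2 = '(' := by simp [pvFlip, ht2]
            have hA : cwStep ((t :: ulr), ur, wl, wr, ((t :: ulr).head?.map Prod.snd)) ((k : Int), ')')
                = (ulr, ur, t :: wl, ((k : Int), ')') :: wr, (ulr.head?.map Prod.snd)) := by
              simp [cwStep, ht2]
            have hB : fbStep (out, ((t :: ulr).map Prod.fst), drop) ((k : Int), ')')
                = (out.set m '(', ulr.map Prod.fst, drop) := by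
              have hstep : fbStep (out, ((t :: ulr).map Prod.fst), drop) ((k : Int), ')')
                  = (PySem.List.pySetD out t.1 '(', ulr.map Prod.fst, drop) := by
                simp [fbStep]
              rw [hstep, hm1, PySem.List.pySetD_natCast]
            have hmlen : m < cs0.length := by
              have := (List.getElem?_eq_some_iff.mp houtm).1
              omega
            have houtnew : out.set m '(' = pvPatch cs0 (t :: wl) := by
              show _ = (pvPatch cs0 wl).set t.1.toNat (pvFlip t.2)
              rw [← h6, hflip, hm1, Int.toNat_natCast]
            rw [hA, hB]
            apply ih (k + 1) ulr ur (t :: wl) (((k : Int), ')') :: wr) (out.set m '(') drop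
              ?_ (List.pairwise_cons.mp hdec).2 h4 ?_ houtnew ?_
            · intro p hp
              obtain ⟨ho, m', h1, h2, h3'⟩ := h3 p (List.mem_cons_of_mem t hp)
              have hne : m' ≠ m := by
                have hlt := (List.pairwise_cons.mp hdec).1 p hp
                rw [h1, hm1] at hlt
                exact_mod_cast Int.ne_of_lt hlt
              exact ⟨ho, m', h1, by omega, by rw [List.getElem?_set_ne (Ne.symm hne)]; exact h3'⟩
            · intro m' hm
              rw [List.getElem?_set_ne (by omega)]
              exact h5s m' hm
            · intro p hp
              rcases List.mem_cons.mp hp with rfl | hp'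
              · exact ⟨m, hm1, hmlen⟩
              · exact h7 p hp'
      · by_cases hcq : c = ']'
        · subst hcq
          by_cases hprev : ul.head?.map Prod.snd = some '['
          · cases ul with
            | nil => simp at hprev
            | cons t ulr =>
              have ht2 : t.2 = '[' := by simpa using hprev
              obtain ⟨hop, m, hm1, hmk, houtm⟩ := h3 t (List.mem_cons_self)
              have hA : cwStep ((t :: ulr), ur, wl, wr, ((t :: ulr).head?.map Prod.snd)) ((k : Int), ']')
                  = (ulr, ur, wl, wr, (ulr.head?.map Prod.snd)) := by
                simp [cwStep, ht2]
              have hB : fbStep (out, ((t :: ulr).map Prod.fst), drop) ((k : Int), ']')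
                  = (out, ulr.map Prod.fst, drop) := by
                have hstep : fbStep (out, ((t :: ulr).map Prod.fst), drop) ((k : Int), ']')
                    = (PySem.List.pySetD out t.1 '[', ulr.map Prod.fst, drop) := by
                  simp [fbStep]
                rw [hstep, hm1, PySem.List.pySetD_natCast, set_same out m '[' (ht2 ▸ houtm)]
              rw [hA, hB]
              apply ih (k + 1) ulr ur wl wr out drop ?_ (List.pairwise_cons.mp hdec).2 h4 h5s h6 h7
              intro p hp
              obtain ⟨ho, m', h1, h2, h3'⟩ := h3 p (List.mem_cons_of_mem t hp)
              exact ⟨ho, m', h1, by omega, h3'⟩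
          · cases ul with
            | nil =>
              have hA : cwStep (([] : List (Int × Char)), ur, wl, wr, (([] : List (Int × Char)).head?.map Prod.snd)) ((k : Int), ']')
                  = ([], ((k : Int), ']') :: ur, wl, wr, none) := by
                simp [cwStep]
              have hB : fbStep (out, (([] : List (Int × Char)).map Prod.fst), drop) ((k : Int), ']')
                  = (out, ([] : List Int), drop.add (k : Int)) := by
                simp [fbStep]
              rw [hA, hB]
              apply ih (k + 1) [] (((k : Int), ']') :: ur) wl wr out (drop.add (k : Int))
                (by intro p hp; cases hp) List.Pairwise.nil ?_ h5s h6 h7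
              intro j
              rw [contains_add, h4]
              simp only [List.map_cons, List.mem_cons]
              tauto
            | cons t ulr =>
              have ht2 : t.2 ≠ '[' := by
                intro hcontra
                exact hprev (by simp [hcontra])
              obtain ⟨hop, m, hm1, hmk, houtm⟩ := h3 t (List.mem_cons_self)
              have ht2' : t.2 = '(' := by
                rcases hop with h | h
                · exact h
                · exact absurd h ht2
              have hflip : pvFlip t.2 = '[' := by simp [pvFlip, ht2']
              have hA : cwStep ((t :: ulr), ur, wl, wr, ((t :: ulr).head?.map Prod.snd)) ((k : Int), ']')
                  = (ulr, ur, t :: wl, ((k : Int), ']') :: wr, (ulr.head?.map Prod.snd)) := by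
                simp [cwStep, ht2]
              have hB : fbStep (out, ((t :: ulr).map Prod.fst), drop) ((k : Int), ']')
                  = (out.set m '[', ulr.map Prod.fst, drop) := by
                have hstep : fbStep (out, ((t :: ulr).map Prod.fst), drop) ((k : Int), ']')
                    = (PySem.List.pySetD out t.1 '[', ulr.map Prod.fst, drop) := by
                  simp [fbStep]
                rw [hstep, hm1, PySem.List.pySetD_natCast]
              have hmlen : m < cs0.length := by
                have := (List.getElem?_eq_some_iff.mp houtm).1
                omega
              have houtnew : out.set m '[' = pvPatch cs0 (t :: wl) := by
                show _ = (pvPatch cs0 wl).set t.1.toNat (pvFlip t.2)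
                rw [← h6, hflip, hm1, Int.toNat_natCast]
              rw [hA, hB]
              apply ih (k + 1) ulr ur (t :: wl) (((k : Int), ']') :: wr) (out.set m '[') drop
                ?_ (List.pairwise_cons.mp hdec).2 h4 ?_ houtnew ?_
              · intro p hp
                obtain ⟨ho, m', h1, h2, h3'⟩ := h3 p (List.mem_cons_of_mem t hp)
                have hne : m' ≠ m := by
                  have hlt := (List.pairwise_cons.mp hdec).1 p hp
                  rw [h1, hm1] at hlt
                  exact_mod_cast Int.ne_of_lt hlt
                exact ⟨ho, m', h1, by omega, by rw [List.getElem?_set_ne (Ne.symm hne)]; exact h3'⟩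
              · intro m' hm
                rw [List.getElem?_set_ne (by omega)]
                exact h5s m' hm
              · intro p hp
                rcases List.mem_cons.mp hp with rfl | hp'
                · exact ⟨m, hm1, hmlen⟩
                · exact h7 p hp'
        · -- not a bracket: both states unchanged
          have hA : cwStep (ul, ur, wl, wr, ul.head?.map Prod.snd) ((k : Int), c)
              = (ul, ur, wl, wr, ul.head?.map Prod.snd) := by
            simp [cwStep, hopen, hcp, hcq]
          have hB : fbStep (out, ul.map Prod.fst, drop) ((k : Int), c)
              = (out, ul.map Prod.fst, drop) := by
            simp [fbStep, hopen, hcp, hcq]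
          rw [hA, hB]
          apply ih (k + 1) ul ur wl wr out drop ?_ hdec h4 h5s h6 h7
          intro p hp
          obtain ⟨ho, m, h1, h2, h3'⟩ := h3 p hp
          exact ⟨ho, m, h1, by omega, h3'⟩

-- building the dict comprehension: inserts with fresh, pairwise-distinct keys append
theorem foldl_insert_fresh (l : List (Int × Char)) : ∀ (d : PySem.Dict Int Char),
    (∀ p ∈ l, ¬ p.1 ∈ d.items.map Prod.fst) → (l.map Prod.fst).Nodup →
    l.foldl (fun d p => d.insert p.1 p.2) d = PySem.Dict.mk (d.items ++ l) := by
  induction l with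
  | nil => intro d _ _; simp only [List.foldl_nil, List.append_nil]
  | cons p l ih =>
    intro d hfresh hnodup
    have hc : d.contains p.1 = false := by
      rw [PySem.Dict.contains_eq_decide_mem_keys]
      simpa [PySem.Dict.keys] using hfresh p (by simp)
    have hitems := PySem.Dict.items_insert_of_not_contains d p.2 hc
    have hstep : d.insert p.1 p.2 = PySem.Dict.mk (d.items ++ [p]) := by
      apply PySem.Dict.ext; simpa using hitems
    have hf' : ∀ q ∈ l, ¬ q.1 ∈ (PySem.Dict.mk (d.items ++ [p])).items.map Prod.fst := by
      intro q hq
      simp only [List.map_append, List.mem_append, List.map_cons,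
        List.map_nil, List.mem_singleton, not_or]
      refine ⟨hfresh q (by simp [hq]), ?_⟩
      have h1 := (List.nodup_cons.mp hnodup).1
      intro hcontra
      exact h1 (hcontra ▸ List.mem_map_of_mem hq)
    rw [List.foldl_cons, hstep, ih _ hf' (List.nodup_cons.mp hnodup).2]
    simp

-- one in-place overwrite of an existing key = one List.set under enumerate
theorem enumerate_set (xs : List Char) : ∀ (m : Nat) (v : Char) (s : Int), m < xs.length →
    PySem.List.enumerate (xs.set m v) s
      = (PySem.List.enumerate xs s).map (fun p => if p.1 == s + (m : Int) then (s + (m : Int), v) else p) := by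
  induction xs with
  | nil => intro m v s h; simp at h
  | cons x xs ih =>
    intro m v s h
    cases m with
    | zero =>
      simp only [List.set_cons_zero, PySem.List.enumerate_cons, List.map_cons,
        Nat.cast_zero, add_zero, beq_self_eq_true]
      congr 1
      rw [List.map_congr_left (g := id), List.map_id]
      intro p hp
      rcases (PySem.List.mem_enumerate_iff _ _ _).mp hp with ⟨k, hk, rfl⟩
      simp only [id, ite_eq_right_iff]
      intro hbeq
      exfalso
      have : s + 1 + (k : Int) = s := by exact_mod_cast of_decide_eq_true hbeq
      omega
    | succ m =>
      simp only [List.set_cons_succ, PySem.List.enumerate_cons, List.map_cons]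
      have hkey : s + ((m + 1 : Nat) : Int) = (s + 1) + (m : Int) := by push_cast; ring
      have hhead : (if (s : Int) == s + ((m + 1 : Nat) : Int) then (s + ((m + 1 : Nat) : Int), v) else ((s : Int), x)) = ((s : Int), x) := by
        rw [if_neg]; simp only [beq_iff_eq]; omega
      rw [hhead]
      congr 1
      rw [ih m v (s + 1) (by simpa using h)]
      simp only [hkey]

theorem insert_set (xs : List Char) (m : Nat) (v : Char) (h : m < xs.length) :
    (PySem.Dict.mk (PySem.List.enumerate xs)).insert (m : Int) v
      = PySem.Dict.mk (PySem.List.enumerate (xs.set m v)) := by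
  have hc : (PySem.Dict.mk (PySem.List.enumerate xs)).contains (m : Int) = true := by
    rw [PySem.Dict.contains_eq_decide_mem_keys]
    simp only [PySem.Dict.keys, decide_eq_true_eq]
    show (m : Int) ∈ (PySem.List.enumerate xs 0).map Prod.fst
    have := PySem.List.map_fst_enumerate xs 0
    simp only [show (Prod.fst : Int × Char → Int) = fun x => x.1 from rfl]
    rw [this]
    rw [PySem.List.mem_pyRange_one]
    constructor
    · positivity
    · omega
  apply PySem.Dict.ext
  rw [PySem.Dict.items_insert_of_contains _ _ hc]
  show _ = PySem.List.enumerate (xs.set m v) 0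
  rw [enumerate_set xs m v 0 h]
  simp

-- A's lefts_swap loop = B's accumulated patches
theorem foldl_insert_patch (wlist : List (Int × Char)) : ∀ (xs : List Char),
    (∀ p ∈ wlist, ∃ m : Nat, p.1 = (m : Int) ∧ m < xs.length) →
    wlist.foldl (fun d p => d.insert p.1 (pvFlip p.2)) (PySem.Dict.mk (PySem.List.enumerate xs))
      = PySem.Dict.mk (PySem.List.enumerate (wlist.foldl (fun o p => o.set p.1.toNat (pvFlip p.2)) xs)) := by
  induction wlist with
  | nil => intro xs _; rfl
  | cons p w ih =>
    intro xs hb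
    obtain ⟨m, hm1, hm2⟩ := hb p (by simp)
    have hrest : ∀ q ∈ w, ∃ m : Nat, q.1 = (m : Int) ∧ m < xs.length := fun q hq => hb q (by simp [hq])
    rw [List.foldl_cons, List.foldl_cons, hm1, insert_set xs m (pvFlip p.2) hm2]
    have : ((m : Int)).toNat = m := Int.toNat_natCast m
    rw [this, ih (xs.set m (pvFlip p.2))]
    intro q hq
    obtain ⟨m', h1, h2⟩ := hrest q hq
    exact ⟨m', h1, by simpa using h2⟩

-- A's brackets_remove loop = a filter on the items
theorem foldl_erase_filter (r : List (Int × Char)) : ∀ (l : List (Int × Char)),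
    r.foldl (fun d p => d.erase p.1) (PySem.Dict.mk l)
      = PySem.Dict.mk (l.filter (fun q => !(r.map Prod.fst).contains q.1)) := by
  intro l
  induction r generalizing l with
  | nil => simp
  | cons p r ih =>
    rw [List.foldl_cons]
    have : (PySem.Dict.mk l).erase p.1 = PySem.Dict.mk (l.filter (fun q => !(q.1 == p.1))) := rfl
    rw [this, ih]
    congr 1
    rw [List.filter_filter]
    apply List.filter_congr
    intro q _
    simp only [List.map_cons, List.contains_cons, Bool.not_or]
    exact Bool.and_comm _ _

theorem contains_foldl_add (xs : List Int) : ∀ (s : PySem.Set Int) (j : Int),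
    (xs.foldl PySem.Set.add s).contains j = true ↔ s.contains j = true ∨ j ∈ xs := by
  intro s j
  induction xs generalizing s with
  | nil => simp
  | cons x xs ih =>
    rw [List.foldl_cons, ih, contains_add]
    simp only [List.mem_cons]
    tauto

theorem filterMap_if (l : List (Int × Char)) (g : Int → Bool) :
    (l.filterMap fun p => if g p.1 then none else some p.2)
      = (l.filter (fun p => !g p.1)).map Prod.snd := by
  induction l with
  | nil => rfl
  | cons p l ih =>
    by_cases h : g p.1 <;> simp [h, ih]

-- ===== VERDICT (by name: the statement is the Claim_ definition above) =====
theorem bool_eq_of_iff (a b : Bool) (h : a = true ↔ b = true) : a = b := by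
  cases a <;> cases b <;> simp_all

theorem fix_bracket_seq_spec : Claim_equal_fix_bracket_seq := by
  unfold Claim_equal_fix_bracket_seq
  intro s _
  unfold Spec_fix_bracket_seq fix_bracket_seq fix_bracket_seq_alt count_wrong_brackets
  simp only []
  have hsim := sim s.toList s.toList 0 [] [] [] [] s.toList PySem.Set.empty
    (fun p hp => absurd hp (List.not_mem_nil))
    List.Pairwise.nil
    (fun j => by simp [PySem.Set.contains, PySem.Set.empty])
    (fun m hm => by simp [List.getElem?_eq_getElem hm])
    rfl
    (fun p hp => absurd hp (List.not_mem_nil))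
  unfold pvRel at hsim
  simp only [Nat.cast_zero, List.head?_nil, Option.map_none, List.map_nil] at hsim
  obtain ⟨hstack, hdrop, hout, hwl⟩ := hsim
  have hnodup : ((PySem.List.enumerate s.toList 0).map Prod.fst).Nodup := by
    have hp := PySem.List.pairwise_lt_enumerate s.toList 0
    exact (List.pairwise_map.mpr hp).imp (fun h => ne_of_lt h)
  have hbuild : (PySem.List.enumerate s.toList 0).foldl (fun d p => d.insert p.1 p.2) (PySem.Dict.mk [])
      = PySem.Dict.mk (PySem.List.enumerate s.toList 0) := by
    have := foldl_insert_fresh (PySem.List.enumerate s.toList 0) (PySem.Dict.mk [])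
      (by intro p hp; simp) hnodup
    simpa using this
  rw [hbuild]
  have hpatch : ((List.foldl cwStep ([], [], [], [], none) (PySem.List.enumerate s.toList 0)).2.2.1.reverse).foldl
        (fun d p => d.insert p.1 (pvFlip p.2)) (PySem.Dict.mk (PySem.List.enumerate s.toList 0))
      = PySem.Dict.mk (PySem.List.enumerate (List.foldl fbStep (s.toList, [], PySem.Set.empty) (PySem.List.enumerate s.toList 0)).1) := by
    rw [foldl_insert_patch _ _ (by intro p hp; exact hwl p (List.mem_reverse.mp hp))]
    congr 2
    rw [List.foldl_reverse, hout]
    rfl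
  rw [hpatch, foldl_erase_filter, PySem.Dict.values_mk, filterMap_if,
    show (fun x : Int × Char => x.2) = Prod.snd from rfl]
  congr 1
  refine congrArg (List.map Prod.snd) ?_
  apply List.filter_congr
  intro q _
  refine congrArg (fun b => !b) ?_
  apply bool_eq_of_iff
  rw [contains_foldl_add, hdrop, hstack]
  simp only [List.map_append, List.map_reverse, List.mem_append, List.mem_reverse,
    List.contains_iff_mem, List.mem_map]
  exact or_comm
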